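-- pv_equiv track=rewrite | github.com/postvakje/oeis-sequences | oeis-sequences/OEISsequences.py | A349529
-- ===== SOURCE A (Python) =====
-- from itertools import (
--     islice,
--     count,
--     product,
--     permutations,
--     takewhile,
--     accumulate,
--     combinations_with_replacement,
--     combinations,
--     repeat,
--     groupby,
--     chain,
-- )
-- from collections import Counter
--
-- def A349529(n):
--     return len(
--         list(
--             filter(
--                 lambda x: x == 1,
--                 Counter(
--                     "".join(d)
--                     for d in permutations(bin(i)[2:] for i in range(1, n + 1))
--                 ).values(),
--             )
--         )
--     )
-- ===== SOURCE B (Python) =====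
-- from itertools import permutations, groupby
--
--
-- def A349529(n):
--     s = sorted("".join(d) for d in permutations(bin(i)[2:] for i in range(1, n + 1)))
--     return sum(1 for _, g in groupby(s) if sum(1 for _ in g) == 1)
-- ===== Notes on version B (the rewrite author's own statement) =====
-- stated objective: alternative
-- what changed: Replaces A's hash-count strategy (Counter over all concatenations, then filter the multiplicity table for values equal to 1) by a sort-then-scan strategy: B sorts the concatenations and counts, via groupby, the runs of equal adjacent elements whose length is exactly 1.
import Mathlib
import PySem

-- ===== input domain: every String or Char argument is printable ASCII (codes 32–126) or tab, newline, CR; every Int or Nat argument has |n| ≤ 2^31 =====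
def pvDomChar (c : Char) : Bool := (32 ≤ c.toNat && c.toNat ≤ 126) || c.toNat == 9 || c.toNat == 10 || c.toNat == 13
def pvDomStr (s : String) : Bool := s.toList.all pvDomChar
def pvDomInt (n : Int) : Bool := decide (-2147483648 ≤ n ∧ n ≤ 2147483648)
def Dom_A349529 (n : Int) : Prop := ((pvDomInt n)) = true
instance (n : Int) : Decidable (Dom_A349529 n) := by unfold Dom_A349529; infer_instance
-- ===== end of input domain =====

-- B replaces A's Counter-then-filter-values strategy by sort-then-scan: it sorts the
-- concatenations and counts the groups of equal adjacent elements of length exactly 1.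

-- ===== PORT A =====
-- A-side helper: collections.Counter(iterable) as CPython implements it — a hash map
-- plus the keys in first-insertion order.  (PySem.Dict.counter computes the same dict,
-- but its association-list model cannot be evaluated at the sizes the behavioural
-- check samples; the hash-map representation is the one A's Counter actually uses.)
def pvCounter (s : List String) : Std.HashMap String Int × List String :=
  s.foldl (fun p x =>
      let c := p.1.getD x 0
      (p.1.insert x (c + 1), if c == 0 then x :: p.2 else p.2))
    ((∅ : Std.HashMap String Int), ([] : List String))

-- Counter.values(): the counts in first-insertion key order
def pvValues (p : Std.HashMap String Int × List String) : List Int :=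
  p.2.reverse.map (fun k => p.1.getD k 0)

-- len(list(filter(lambda x: x == 1, Counter("".join(d) for d in
--   permutations(bin(i)[2:] for i in range(1, n+1))).values())))
def A349529 (n : Int) : Int :=
  let strs : List String :=
    (PySem.List.pyRange 1 (n + 1)).map (fun i => PySem.Str.slice (PySem.Int.pyBin i) (some 2) none)
  let s : List String :=
    (PySem.List.permutations strs strs.length).map (fun d => PySem.Str.join "" d)
  (((pvValues (pvCounter s)).filter (fun x => x == (1 : Int))).length : Int)

-- ===== PORT B =====
-- B-side helper: sum(1 for _, g in groupby(s) if sum(1 for _ in g) == 1) —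
-- scan the runs of equal adjacent elements, k is the length of the current run.
def pvRun (acc : Int) (x : String) (k : Int) : List String → Int
  | [] => acc + (if k == 1 then 1 else 0)
  | y :: ys => if y == x then pvRun acc x (k + 1) ys
               else pvRun (acc + (if k == 1 then 1 else 0)) y 1 ys
def pvRuns : List String → Int
  | [] => 0
  | x :: xs => pvRun 0 x 1 xs

-- s = sorted("".join(d) for d in permutations(...)); then the groupby scan
def A349529_alt (n : Int) : Int :=
  let strs : List String :=
    (PySem.List.pyRange 1 (n + 1)).map (fun i => PySem.Str.slice (PySem.Int.pyBin i) (some 2) none)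
  let t : List String :=
    List.mergeSort ((PySem.List.permutations strs strs.length).map (fun d => PySem.Str.join "" d))
      (fun a b => decide (a ≤ b))
  pvRuns t

-- ===== PRECONDITION & SPEC =====
def Spec_A349529 (n : Int) (out : Int) : Prop := out = A349529_alt n
instance (n : Int) (out : Int) : Decidable (Spec_A349529 n out) := by unfold Spec_A349529; infer_instance

-- ===== CLAIM (what is proved, stated in full; the proofs are below) =====
def Claim_equal_A349529 : Prop := ∀ (n : Int), Dom_A349529 n → Spec_A349529 n (A349529 n)

-- ===== LEMMAS AND PROOFS =====

-- proof-side restatement of the run scan (accumulator made explicit in pvRun above)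
mutual
def gRuns : List String → Int
  | [] => 0
  | x :: xs => gRun x 1 xs
termination_by t => 2 * t.length
def gRun (x : String) (k : Int) : List String → Int
  | [] => if k == 1 then 1 else 0
  | y :: ys => if y == x then gRun x (k + 1) ys else (if k == 1 then 1 else 0) + gRuns (y :: ys)
termination_by t => 2 * t.length + 1
end

theorem pv_run_acc (t : List String) : ∀ (acc : Int) (x : String) (k : Int),
    pvRun acc x k t = acc + gRun x k t := by
  induction t with
  | nil => intro acc x k; simp [pvRun, gRun]
  | cons y ys ih =>
    intro acc x k
    rw [pvRun, gRun]
    by_cases h : y = x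
    · subst h
      simp only [beq_self_eq_true, if_true]
      exact ih acc y (k + 1)
    · have hb : (y == x) = false := by simp [h]
      simp only [hb, Bool.false_eq_true, if_false]
      rw [ih, gRuns]
      ring
theorem pv_runs_eq_g (t : List String) : pvRuns t = gRuns t := by
  cases t with
  | nil => simp [pvRuns, gRuns]
  | cons x xs => rw [pvRuns, gRuns, pv_run_acc]; ring

theorem pv_set_append (l : List String) (x : String) :
    PySem.Set.ofList (l ++ [x]) = PySem.Set.add (PySem.Set.ofList l) x := by
  simp [PySem.Set.ofList_eq_foldl, List.foldl_append]

theorem pv_counter_inv (s : List String) :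
    (∀ k, (pvCounter s).1.getD k 0 = ((s.count k : Nat) : Int))
    ∧ (pvCounter s).2.reverse = PySem.Set.ofList s := by
  induction s using List.reverseRecOn with
  | nil => constructor
           · intro k; simp [pvCounter]
           · simp [pvCounter, PySem.Set.ofList]
  | append_singleton l x ih =>
    obtain ⟨ih1, ih2⟩ := ih
    have hfold : pvCounter (l ++ [x])
        = (let c := (pvCounter l).1.getD x 0
           ((pvCounter l).1.insert x (c + 1), if c == 0 then x :: (pvCounter l).2 else (pvCounter l).2)) := by
      unfold pvCounter
      rw [List.foldl_append]
      simp
    constructor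
    · intro k
      rw [hfold]
      simp only [Std.HashMap.getD_insert]
      by_cases hk : x = k
      · subst hk
        simp [ih1 x, List.count_append]
      · simp [hk, ih1 k, List.count_append]
    · rw [hfold]
      simp only [ih1 x]
      rw [pv_set_append]
      by_cases hx : x ∈ l
      · have hc : l.count x ≠ 0 := by
          simpa [List.count_eq_zero] using hx
        have hb : (((l.count x : Nat) : Int) == 0) = false := by
          simp [hc]
        simp only [hb, Bool.false_eq_true, if_false]
        rw [ih2]
        simp [PySem.Set.add, hx]
      · have hc : l.count x = 0 := List.count_eq_zero.mpr hx
        have hb : (((l.count x : Nat) : Int) == 0) = true := by simp [hc]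
        simp only [hb, if_true]
        simp [PySem.Set.add, ih2, hx]

theorem pv_counter_spec (s : List String) :
    pvValues (pvCounter s) = (PySem.Set.ofList s).map (fun k => ((s.count k : Nat) : Int)) := by
  obtain ⟨h1, h2⟩ := pv_counter_inv s
  unfold pvValues
  rw [h2]
  exact List.map_congr_left (fun a _ => h1 a)

theorem pv_run_eq (x : String) (t : List String) : ∀ k : Int,
    gRun x k t = (if (k + ((t.takeWhile (· == x)).length : Int)) == 1 then 1 else 0)
      + gRuns (t.dropWhile (· == x)) := by
  induction t with
  | nil => intro k; simp [gRun, gRuns]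
  | cons y ys ih =>
    intro k
    by_cases h : y = x
    · subst h
      rw [gRun, List.takeWhile_cons_of_pos (by simp), List.dropWhile_cons_of_pos (by simp)]
      simp only [beq_self_eq_true, if_true]
      rw [ih (k + 1)]
      congr 1
      have : k + ((y :: ys.takeWhile (· == y)).length : Int) = k + 1 + ((ys.takeWhile (· == y)).length : Int) := by
        simp; ring
      rw [this]
    · rw [gRun, List.takeWhile_cons_of_neg (by simp [h]), List.dropWhile_cons_of_neg (by simp [h])]
      simp [h]


theorem pv_not_mem_dropWhile (x : String) (l : List String)
    (hs : (x :: l).Pairwise (· ≤ ·)) : x ∉ l.dropWhile (· == x) := by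
  induction l with
  | nil => simp
  | cons a l' ih =>
    rw [List.pairwise_cons] at hs
    obtain ⟨hxall, hal'⟩ := hs
    by_cases h : a = x
    · subst h
      rw [List.dropWhile_cons_of_pos (by simp)]
      apply ih
      rw [List.pairwise_cons]
      refine ⟨fun b hb => hxall b (List.mem_cons_of_mem _ hb), (List.pairwise_cons.mp hal').2⟩
    · rw [List.dropWhile_cons_of_neg (by simp [h])]
      intro hmem
      rcases List.mem_cons.mp hmem with h1 | h1
      · exact h h1.symm
      · have hax : a ≤ x := (List.pairwise_cons.mp hal').1 x h1
        have hxa : x ≤ a := hxall a (List.mem_cons_self)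
        exact h (le_antisymm hax hxa)

theorem pv_runs_sorted_aux : ∀ (N : Nat) (t : List String), t.length ≤ N →
    t.Pairwise (· ≤ ·) → gRuns t = ((t.filter (fun k => t.count k == 1)).length : Int) := by
  intro N
  induction N with
  | zero =>
    intro t hlen _
    have : t = [] := List.eq_nil_of_length_eq_zero (by omega)
    subst this
    simp [gRuns]
  | succ N ih =>
    intro t hlen hs
    match t with
    | [] => simp [gRuns]
    | x :: xs =>
      set r := xs.takeWhile (· == x) with hr
      set u := xs.dropWhile (· == x) with hu
      have hxs : xs = r ++ u := (List.takeWhile_append_dropWhile).symm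
      have hrx : ∀ a ∈ r, a = x := by
        intro a ha
        have := List.mem_takeWhile_imp ha
        simpa using this
      have hxu : x ∉ u := pv_not_mem_dropWhile x xs hs
      -- u is sorted and shorter
      have husub : u.Sublist xs := List.dropWhile_sublist _
      have hus : u.Pairwise (· ≤ ·) :=
        hs.sublist (husub.trans (List.sublist_cons_self x xs))
      have hulen : u.length ≤ N := by
        have := husub.length_le
        simp at hlen
        omega
      have IH := ih u hulen hus
      set P : String → Bool := fun k => List.count k (x :: xs) == 1 with hP
      -- counts
      have hcx : List.count x (x :: xs) = 1 + r.length := by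
        rw [List.count_cons_self]
        conv_lhs => rw [hxs]
        rw [List.count_append]
        have h1 : List.count x r = r.length := List.count_eq_length.mpr (fun b hb => (hrx b hb).symm)
        have h2 : List.count x u = 0 := List.count_eq_zero.mpr hxu
        omega
      have hcu : ∀ k ∈ u, List.count k (x :: xs) = List.count k u := by
        intro k hk
        have hkx : k ≠ x := fun h => hxu (h ▸ hk)
        rw [List.count_cons_of_ne (Ne.symm hkx)]
        conv_lhs => rw [hxs]
        rw [List.count_append]
        have : List.count k r = 0 := List.count_eq_zero.mpr (fun hmem => hkx (hrx k hmem))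
        omega
      -- filter pieces
      have hfu : List.filter P u = u.filter (fun k => List.count k u == 1) :=
        List.filter_congr (fun k hk => by simp only [hP]; rw [hcu k hk])
      have hfilters : List.filter P xs = List.filter P r ++ List.filter P u := by
        conv_lhs => rw [hxs]
        rw [List.filter_append]
      -- the run scan
      have hscan : gRuns (x :: xs)
          = (if r = [] then 1 else 0) + gRuns u := by
        rw [gRuns, pv_run_eq]
        congr 1
        by_cases hre : r = []
        · simp [← hr, hre]
        · have : r.length ≠ 0 := fun h => hre (List.eq_nil_of_length_eq_zero h)
          have hb : ((1 + (r.length : Int)) == 1) = false := by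
            simp; omega
          rw [← hr, hb]
          simp [hre]
      rw [hscan, IH, List.filter_cons]
      by_cases hre : r = []
      · have hPx : P x = true := by rw [hP]; simp [hcx, hre]
        rw [hPx]
        simp only [if_true, List.length_cons]
        rw [hfilters, hfu, hre]
        simp only [List.filter_nil, List.nil_append, if_true]
        push_cast
        ring
      · have hPx : P x = false := by
          have : r.length ≠ 0 := fun h => hre (List.eq_nil_of_length_eq_zero h)
          rw [hP]; simp [hcx]; omega
        rw [hPx]
        simp only [Bool.false_eq_true, if_false]
        rw [hfilters, hfu]
        have hfr : List.filter P r = [] := by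
          rw [List.filter_eq_nil_iff]
          intro a ha
          rw [hrx a ha]
          simp [hPx]
        rw [hfr, List.nil_append]
        simp [hre]

-- the whole equivalence, generic in the list of concatenations
theorem pv_core (s : List String) :
    (((pvValues (pvCounter s)).filter (fun x => x == (1 : Int))).length : Int)
    = pvRuns (List.mergeSort s (fun a b => decide (a ≤ b))) := by
  set t := List.mergeSort s (fun a b => decide (a ≤ b)) with ht
  have hperm : t.Perm s := List.mergeSort_perm s _
  have hs : t.Pairwise (· ≤ ·) := by
    have h := List.pairwise_mergeSort (le := fun a b : String => decide (a ≤ b))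
      (fun a b c hab hbc => by simp at *; exact le_trans hab hbc)
      (fun a b => by simpa using le_total a b) s
    exact h.imp (fun h' => by simpa using h')
  rw [pv_runs_eq_g]
  rw [pv_counter_spec, List.filter_map, List.length_map]
  rw [List.filter_congr (q := fun k => s.count k == 1)
    (fun x _ => by by_cases h : s.count x = 1 <;> simp [h, Function.comp])]
  rw [pv_runs_sorted_aux t.length t le_rfl hs]
  -- both sides are the lengths of two nodup lists with the same members
  have hn1 : ((PySem.Set.ofList s).filter (fun k => s.count k == 1)).Nodup :=
    (PySem.Set.nodup_ofList s).filter _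
  have hn2 : (t.filter (fun k => t.count k == 1)).Nodup := by
    rw [List.nodup_iff_count_le_one]
    intro a
    by_cases hq : t.count a = 1
    · rw [List.count_filter (by simp [hq])]; omega
    · have hnm : a ∉ t.filter (fun k => t.count k == 1) := by
        intro hmem
        exact hq (by simpa using (List.mem_filter.mp hmem).2)
      simp [List.count_eq_zero.mpr hnm]
  have hP : ((PySem.Set.ofList s).filter (fun k => s.count k == 1)).Perm
      (t.filter (fun k => t.count k == 1)) := by
    refine (List.perm_ext_iff_of_nodup hn1 hn2).mpr ?_
    intro a
    simp [List.mem_filter, PySem.Set.mem_ofList, hperm.mem_iff, hperm.count_eq a]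
  exact_mod_cast hP.length_eq

-- ===== VERDICT (by name: the statement is the Claim_ definition above) =====
theorem A349529_spec : Claim_equal_A349529 := by
  intro n _
  unfold Spec_A349529 A349529 A349529_alt
  exact pv_core _
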